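-- pv_equiv track=rewrite | github.com/edoaki/crew_scheduling | viz/plot_core.py | group_by_train
-- ===== SOURCE A (Python) =====
-- from typing import Dict, Any, List, Tuple, Set, Optional
--
-- def group_by_train(data: Dict[str, Any]) -> Dict[str, List[int]]:
--     """
--     train_id ごとの行インデックスを depart_time 昇順でまとめる。
--     """
--     tids = [str(t) for t in data["train_id"]]
--     groups: Dict[str, List[int]] = {}
--     for i, tid in enumerate(tids):
--         groups.setdefault(tid, []).append(i)
--     dep_t_all = data["depart_time"]
--     for tid in groups:
--         groups[tid].sort(key=lambda i: int(dep_t_all[i]))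
--     return groups
-- ===== SOURCE B (Python) =====
-- from typing import Dict, Any, List
--
--
-- def group_by_train(data: Dict[str, Any]) -> Dict[str, List[int]]:
--     """
--     train_id ごとの行インデックスを depart_time 昇順でまとめる。
--     One global stable sort of all row indices by depart_time, then a single
--     grouping pass: every bucket comes out already sorted (no per-group sort).
--     """
--     tids = [str(t) for t in data["train_id"]]
--     dep_t_all = data["depart_time"]
--     groups: Dict[str, List[int]] = {tid: [] for tid in tids}
--     for i in sorted(range(len(tids)), key=lambda i: int(dep_t_all[i])):
--         groups[tids[i]].append(i)
--     return groups
-- ===== Notes on version B (the rewrite author's own statement) =====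
-- stated objective: alternative
-- what changed: Replaces A's group-then-sort-each-bucket with one global stable sort of all row indices by depart_time followed by a single grouping pass over that order (keys pre-created in first-appearance order, no per-group .sort()).
import Mathlib
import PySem

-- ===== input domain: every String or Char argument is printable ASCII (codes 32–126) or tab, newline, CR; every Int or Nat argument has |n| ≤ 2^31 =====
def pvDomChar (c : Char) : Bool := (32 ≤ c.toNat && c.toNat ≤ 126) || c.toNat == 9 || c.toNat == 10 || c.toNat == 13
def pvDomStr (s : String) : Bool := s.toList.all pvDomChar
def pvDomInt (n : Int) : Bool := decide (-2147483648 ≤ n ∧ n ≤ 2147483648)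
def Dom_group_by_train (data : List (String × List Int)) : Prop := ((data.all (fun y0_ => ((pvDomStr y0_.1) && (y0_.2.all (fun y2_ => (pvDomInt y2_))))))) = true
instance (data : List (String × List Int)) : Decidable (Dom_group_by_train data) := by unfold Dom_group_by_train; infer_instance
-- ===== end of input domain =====

-- B groups row indices by train_id via ONE global stable sort of all indices by depart_time
-- followed by a single grouping pass, instead of A's group-then-sort-each-bucket.

-- ===== PORT A =====
def group_by_train (data : List (String × List Int)) : List (String × List Int) :=
  match (PySem.Dict.ofList data).get? "train_id", (PySem.Dict.ofList data).get? "depart_time" with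
  | some tlist, some dep =>
      let tids := tlist.map PySem.Int.toStr
      let groups := (PySem.List.enumerate tids).foldl
          (fun d p => d.modify p.2 [] (fun l => l ++ [p.1])) (PySem.Dict.empty : PySem.Dict String (List Int))
      let groups2 := groups.keys.foldl
          (fun d tid => d.insert tid
            (PySem.List.sorted (d.getD tid []) (fun i => PySem.List.pyGetD dep i 0) false)) groups
      groups2.items
  | _, _ => []   -- KeyError: excluded by Pre_

-- ===== PORT B =====
def group_by_train_alt (data : List (String × List Int)) : List (String × List Int) :=
  match (PySem.Dict.ofList data).get? "train_id" with
  | none => []   -- KeyError: excluded by Pre_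
  | some tlist =>
    match (PySem.Dict.ofList data).get? "depart_time" with
    | none => []   -- KeyError: excluded by Pre_
    | some dep =>
      let tids := tlist.map PySem.Int.toStr
      let groups0 := tids.foldl (fun d tid => d.insert tid ([] : List Int))
          (PySem.Dict.empty : PySem.Dict String (List Int))
      let order := PySem.List.sorted (PySem.List.pyRange 0 (tids.length : Int))
          (fun i => PySem.List.pyGetD dep i 0) false
      let groups := order.foldl
          (fun d i => d.modify (PySem.List.pyGetD tids i "") [] (fun l => l ++ [i])) groups0
      groups.items

-- ===== PRECONDITION & SPEC =====
-- Pre_ excludes exactly the inputs where Python A raises: a missing "train_id" or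
-- "depart_time" key (KeyError) or a depart_time list shorter than train_id (IndexError
-- inside the sort key).
def Pre_group_by_train (data : List (String × List Int)) : Prop :=
  ((PySem.Dict.ofList data).get? "train_id").isSome = true ∧
  ((PySem.Dict.ofList data).get? "depart_time").isSome = true ∧
  (((PySem.Dict.ofList data).get? "train_id").getD []).length ≤
    (((PySem.Dict.ofList data).get? "depart_time").getD []).length
instance (data : List (String × List Int)) : Decidable (Pre_group_by_train data) := by
  unfold Pre_group_by_train; infer_instance

def pvWitness_group_by_train : (List (String × List Int)) :=
  [("train_id", [3, 1, 3]), ("depart_time", [5, 2, 0])]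

def Spec_group_by_train (data : List (String × List Int)) (out : List (String × List Int)) : Prop := out = group_by_train_alt data
instance (data : List (String × List Int)) (out : List (String × List Int)) : Decidable (Spec_group_by_train data out) := by unfold Spec_group_by_train; infer_instance

-- ===== CLAIM (what is proved, stated in full; the proofs are below) =====
def Claim_equal_group_by_train : Prop := ∀ (data : List (String × List Int)), Dom_group_by_train data → Pre_group_by_train data → Spec_group_by_train data (group_by_train data)

-- ===== LEMMAS AND PROOFS =====

lemma pyGetD_cons_zero {α : Type} (x : α) (xs : List α) (d : α) :
    PySem.List.pyGetD (x :: xs) 0 d = x := by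
  rw [PySem.List.pyGetD_of_nonneg _ _ le_rfl]; rfl

lemma pyGetD_cons_succ {α : Type} (x : α) (xs : List α) (j : Int) (d : α) (h : 0 ≤ j) :
    PySem.List.pyGetD (x :: xs) (j + 1) d = PySem.List.pyGetD xs j d := by
  rw [PySem.List.pyGetD_of_nonneg _ _ (by omega), PySem.List.pyGetD_of_nonneg _ _ h]
  have hj : (j + 1).toNat = j.toNat + 1 := by omega
  rw [hj, List.getD_cons_succ]

lemma enum_map_snd {α : Type} : ∀ (xs : List α) (s : Int),
    (PySem.List.enumerate xs s).map (fun q => q.2) = xs := by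
  intro xs
  induction xs with
  | nil => intro s; simp [PySem.List.enumerate]
  | cons x t ih => intro s; simp [PySem.List.enumerate, ih]

lemma insertBy_all_before {α : Type} (before : α → α → Bool) (x : α) (l : List α)
    (h : ∀ z ∈ l, before x z = true) :
    PySem.List.insertBy before x l = x :: l := by
  cases l with
  | nil => simp [PySem.List.insertBy]
  | cons y ys => simp [PySem.List.insertBy, h y (by simp)]

lemma filter_insertBy {α κ : Type} [LinearOrder κ] (key : α → κ) (p : α → Bool) (x : α) :
    ∀ (ys : List α), ys.Pairwise (fun a b => key a ≤ key b) →
    (PySem.List.insertBy (fun a b => decide (key a < key b)) x ys).filter p =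
      if p x then PySem.List.insertBy (fun a b => decide (key a < key b)) x (ys.filter p)
      else ys.filter p := by
  intro ys
  induction ys with
  | nil =>
    intro _
    by_cases hp : p x <;> simp [PySem.List.insertBy, hp]
  | cons y ys ih =>
    intro hpw
    rcases List.pairwise_cons.mp hpw with ⟨hy, htl⟩
    by_cases hlt : key x < key y
    · have hhead : PySem.List.insertBy (fun a b => decide (key a < key b)) x (y :: ys)
          = x :: y :: ys := by
        simp [PySem.List.insertBy, hlt]
      rw [hhead]
      have hall : ∀ z ∈ (y :: ys).filter p, (fun a b => decide (key a < key b)) x z = true := by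
        intro z hz
        have hz' : z ∈ y :: ys := List.mem_of_mem_filter hz
        have hyz : key y ≤ key z := by
          rcases List.mem_cons.mp hz' with rfl | hmem
          · exact le_rfl
          · exact hy z hmem
        simp [lt_of_lt_of_le hlt hyz]
      by_cases hp : p x
      · rw [if_pos hp, insertBy_all_before _ _ _ hall, List.filter_cons, if_pos hp]
      · rw [if_neg hp, List.filter_cons, if_neg hp]
    · have hstep : PySem.List.insertBy (fun a b => decide (key a < key b)) x (y :: ys)
          = y :: PySem.List.insertBy (fun a b => decide (key a < key b)) x ys := by
        simp [PySem.List.insertBy, hlt]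
      rw [hstep, List.filter_cons]
      by_cases hpy : p y
      · rw [if_pos hpy, ih htl, List.filter_cons, if_pos hpy]
        by_cases hp : p x
        · rw [if_pos hp, if_pos hp]
          have : PySem.List.insertBy (fun a b => decide (key a < key b)) x (y :: ys.filter p)
              = y :: PySem.List.insertBy (fun a b => decide (key a < key b)) x (ys.filter p) := by
            simp [PySem.List.insertBy, hlt]
          rw [this]
        · rw [if_neg hp, if_neg hp]
      · rw [if_neg hpy, ih htl, List.filter_cons, if_neg hpy]

lemma filter_sorted {α κ : Type} [LinearOrder κ] (key : α → κ) (p : α → Bool) (xs : List α) :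
    (PySem.List.sorted xs key false).filter p = PySem.List.sorted (xs.filter p) key false := by
  induction xs using List.reverseRecOn with
  | nil => simp [PySem.List.sorted]
  | append_singleton xs x ih =>
    rw [PySem.List.sorted_eq_foldl_insertBy, List.foldl_append]
    simp only [List.foldl_cons, List.foldl_nil]
    rw [← PySem.List.sorted_eq_foldl_insertBy,
      filter_insertBy key p x _ (PySem.List.sorted_pairwise xs key), List.filter_append]
    by_cases hp : p x
    · rw [if_pos hp, ih]
      have hfx : List.filter p [x] = [x] := by simp [hp]
      rw [hfx, PySem.List.sorted_eq_foldl_insertBy (xs.filter p ++ [x]), List.foldl_append]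
      simp only [List.foldl_cons, List.foldl_nil]
      rw [← PySem.List.sorted_eq_foldl_insertBy]
    · rw [if_neg hp, ih]
      have hfx : List.filter p [x] = [] := by simp [hp]
      rw [hfx, List.append_nil]

lemma sort_loop (g : List Int → List Int) :
    ∀ (ks : List String) (d : PySem.Dict String (List Int)), ks.Nodup → ∀ k : String,
    (ks.foldl (fun d tid => d.insert tid (g (d.getD tid []))) d).getD k [] =
      if k ∈ ks then g (d.getD k []) else d.getD k [] := by
  intro ks
  induction ks with
  | nil => intro d _ k; simp
  | cons a t ih =>
    intro d hnd k
    rcases List.nodup_cons.mp hnd with ⟨ha, ht⟩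
    simp only [List.foldl_cons]
    rw [ih _ ht k]
    by_cases hk : k ∈ t
    · have hne : k ≠ a := by rintro rfl; exact ha hk
      simp [hk, PySem.Dict.getD_insert, hne]
    · by_cases hka : k = a
      · subst hka; simp [hk]
      · simp [hk, hka, PySem.Dict.getD_insert]

lemma getD_insert_nil_fold : ∀ (ts : List String) (d : PySem.Dict String (List Int)) (k : String),
    d.getD k [] = [] →
    (ts.foldl (fun d t => d.insert t ([] : List Int)) d).getD k [] = [] := by
  intro ts
  induction ts with
  | nil => intro d k h; simpa using h
  | cons t ts ih =>
    intro d k h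
    simp only [List.foldl_cons]
    apply ih
    rw [PySem.Dict.getD_insert]
    split <;> simp [h]

lemma set_update_subset : ∀ (l s : List String), (∀ x ∈ l, x ∈ s) → PySem.Set.update s l = s := by
  intro l
  induction l with
  | nil => intro s _; rfl
  | cons x l ih =>
    intro s h
    have hx : x ∈ s := h x (by simp)
    have hadd : PySem.Set.add s x = s := by
      simp [PySem.Set.add, PySem.Set.contains, hx]
    simp only [PySem.Set.update, List.foldl_cons, hadd]
    exact ih s (fun y hy => h y (by simp [hy]))

lemma range_filter_eq (k : String) : ∀ (ts : List String) (s : Int),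
    (PySem.List.pyRange s (s + ts.length)).filter (fun i => PySem.List.pyGetD ts (i - s) "" == k)
    = ((PySem.List.enumerate ts s).filter (fun q => q.2 == k)).map (fun q => q.1) := by
  intro ts
  induction ts with
  | nil => intro s; simp [PySem.List.pyRange, PySem.List.enumerate]
  | cons t ts ih =>
    intro s
    have hcons : PySem.List.pyRange s (s + ((t :: ts).length : Int))
        = s :: PySem.List.pyRange (s + 1) (s + ((t :: ts).length : Int)) :=
      PySem.List.pyRange_one_cons (by simp only [List.length_cons]; omega)
    rw [hcons, List.filter_cons]
    have hstop : s + (((t :: ts).length : Nat) : Int) = (s + 1) + ((ts.length : Nat) : Int) := by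
      simp only [List.length_cons]; omega
    have htail : (PySem.List.pyRange (s + 1) (s + ((t :: ts).length : Int))).filter
          (fun i => PySem.List.pyGetD (t :: ts) (i - s) "" == k)
        = (PySem.List.pyRange (s + 1) ((s + 1) + (ts.length : Int))).filter
          (fun i => PySem.List.pyGetD ts (i - (s + 1)) "" == k) := by
      rw [hstop]
      apply List.filter_congr
      intro i hi
      have hmem := PySem.List.mem_pyRange_one.mp hi
      have h1 : i - s = (i - (s + 1)) + 1 := by ring
      rw [h1, pyGetD_cons_succ _ _ _ _ (by omega)]
    rw [htail, ih (s + 1)]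
    have hhead : PySem.List.pyGetD (t :: ts) (s - s) "" = t := by
      rw [sub_self, pyGetD_cons_zero]
    rw [hhead]
    have henum : PySem.List.enumerate (t :: ts) s = (s, t) :: PySem.List.enumerate ts (s + 1) := by
      simp [PySem.List.enumerate]
    rw [henum, List.filter_cons]
    by_cases htk : (t == k) = true
    · simp [htk]
    · simp [htk]

lemma key_value_eq (tids : List String) (dep : List Int) (k : String) :
    PySem.List.sorted
        (((PySem.List.enumerate tids).filter (fun q => q.2 == k)).map (fun q => q.1))
        (fun i => PySem.List.pyGetD dep i 0) false
    = (PySem.List.sorted (PySem.List.pyRange 0 (tids.length : Int))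
        (fun i => PySem.List.pyGetD dep i 0) false).filter
        (fun i => PySem.List.pyGetD tids i "" == k) := by
  rw [filter_sorted]
  congr 1
  have h := range_filter_eq k tids 0
  rw [zero_add] at h
  rw [← h]
  apply List.filter_congr
  intro i _
  rw [sub_zero]

lemma core_eq (tids : List String) (dep : List Int) :
    (((PySem.List.enumerate tids).foldl
        (fun d p => d.modify p.2 [] (fun l => l ++ [p.1]))
        (PySem.Dict.empty : PySem.Dict String (List Int))).keys.foldl
        (fun d tid => d.insert tid
          (PySem.List.sorted (d.getD tid []) (fun i => PySem.List.pyGetD dep i 0) false))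
        ((PySem.List.enumerate tids).foldl
          (fun d p => d.modify p.2 [] (fun l => l ++ [p.1]))
          (PySem.Dict.empty : PySem.Dict String (List Int)))).items
    = ((PySem.List.sorted (PySem.List.pyRange 0 (tids.length : Int))
          (fun i => PySem.List.pyGetD dep i 0) false).foldl
        (fun d i => d.modify (PySem.List.pyGetD tids i "") [] (fun l => l ++ [i]))
        (tids.foldl (fun d tid => d.insert tid ([] : List Int))
          (PySem.Dict.empty : PySem.Dict String (List Int)))).items := by
  -- abbreviations
  set key : Int → Int := fun i => PySem.List.pyGetD dep i 0 with hkey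
  set G : PySem.Dict String (List Int) :=
    (PySem.List.enumerate tids).foldl
      (fun d p => d.modify p.2 [] (fun l => l ++ [p.1])) PySem.Dict.empty with hGdef
  set order : List Int :=
    PySem.List.sorted (PySem.List.pyRange 0 (tids.length : Int)) key false with horder
  set G0 : PySem.Dict String (List Int) :=
    tids.foldl (fun d tid => d.insert tid ([] : List Int)) PySem.Dict.empty with hG0def
  -- A's grouping dict: keys, nodup, values
  have hGfold : G = ((PySem.List.enumerate tids).map (fun p => (p.2, p.1))).foldl
      (fun d p => d.modify p.1 [] (fun l => l ++ [p.2])) PySem.Dict.empty := by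
    rw [hGdef, List.foldl_map]
  have hGkeys : G.keys = PySem.Set.ofList tids := by
    rw [hGdef]
    have h := PySem.Dict.keys_foldl_modify_key (PySem.List.enumerate tids)
      (fun p : Int × String => p.2) ([] : List Int)
      (fun (_ : PySem.Dict String (List Int)) (p : Int × String) => fun l => l ++ [p.1])
      (PySem.Dict.empty : PySem.Dict String (List Int))
    rw [h, PySem.Dict.keys_empty, enum_map_snd]
    rfl
  have hGnodup : G.keys.Nodup := by
    rw [hGdef]
    exact PySem.Dict.nodup_keys_foldl_modify_key (PySem.List.enumerate tids)
      (fun p : Int × String => p.2) ([] : List Int)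
      (fun (_ : PySem.Dict String (List Int)) (p : Int × String) => fun l => l ++ [p.1])
      PySem.Dict.empty (by rw [PySem.Dict.keys_empty]; exact List.nodup_nil)
  have hGget : ∀ k : String, G.getD k []
      = ((PySem.List.enumerate tids).filter (fun q => q.2 == k)).map (fun q => q.1) := by
    intro k
    rw [hGfold, PySem.Dict.getD_foldl_modify_append, PySem.Dict.getD_empty, List.nil_append,
      List.filter_map, List.map_map]
    rfl
  -- A's final dict
  have hG2keys : ((G.keys.foldl
      (fun d tid => d.insert tid (PySem.List.sorted (d.getD tid []) key false)) G)).keys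
      = G.keys := by
    have h := PySem.Dict.keys_foldl_insert G.keys
      (fun d tid => PySem.List.sorted (d.getD tid []) key false) G
    rw [h]
    exact set_update_subset _ _ (fun x hx => hx)
  have hG2nodup : ((G.keys.foldl
      (fun d tid => d.insert tid (PySem.List.sorted (d.getD tid []) key false)) G)).keys.Nodup := by
    exact PySem.Dict.nodup_keys_foldl_insert _ _ _ hGnodup
  have hAitems : ((G.keys.foldl
      (fun d tid => d.insert tid (PySem.List.sorted (d.getD tid []) key false)) G)).items
      = G.keys.map (fun k => (k, PySem.List.sorted (G.getD k []) key false)) := by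
    rw [PySem.Dict.items_eq_map_keys _ hG2nodup ([] : List Int), hG2keys]
    apply List.map_congr_left
    intro k hk
    rw [sort_loop (fun l => PySem.List.sorted l key false) G.keys G hGnodup k, if_pos hk]
  -- B's dict
  have hG0keys : G0.keys = PySem.Set.ofList tids := by
    rw [hG0def]
    have h := PySem.Dict.keys_foldl_insert tids
      (fun _ _ => ([] : List Int)) (PySem.Dict.empty : PySem.Dict String (List Int))
    rw [h, PySem.Dict.keys_empty]
    rfl
  have hG0nodup : G0.keys.Nodup := by
    rw [hG0def]
    exact PySem.Dict.nodup_keys_foldl_insert _ _ _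
      (by rw [PySem.Dict.keys_empty]; exact List.nodup_nil)
  have hG0get : ∀ k : String, G0.getD k [] = [] := by
    intro k
    rw [hG0def]
    exact getD_insert_nil_fold tids PySem.Dict.empty k (PySem.Dict.getD_empty _ _)
  have hHfold : order.foldl
      (fun d i => d.modify (PySem.List.pyGetD tids i "") [] (fun l => l ++ [i])) G0
      = (order.map (fun i => (PySem.List.pyGetD tids i "", i))).foldl
        (fun d p => d.modify p.1 [] (fun l => l ++ [p.2])) G0 := by
    rw [List.foldl_map]
  have hHkeys : (order.foldl
      (fun d i => d.modify (PySem.List.pyGetD tids i "") [] (fun l => l ++ [i])) G0).keys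
      = PySem.Set.ofList tids := by
    have h := PySem.Dict.keys_foldl_modify_key order
      (fun i : Int => PySem.List.pyGetD tids i "") ([] : List Int)
      (fun (_ : PySem.Dict String (List Int)) (i : Int) => fun l => l ++ [i]) G0
    rw [h, hG0keys]
    apply set_update_subset
    intro x hx
    rcases List.mem_map.mp hx with ⟨i, hi, rfl⟩
    have hi' : i ∈ PySem.List.pyRange 0 (tids.length : Int) :=
      (PySem.List.sorted_perm _ _ _).mem_iff.mp hi
    have hb := PySem.List.mem_pyRange_one.mp hi'
    have hlt : i < (tids.length : Int) := hb.2
    rw [PySem.List.pyGetD_eq_getElem tids "" hb.1 hlt]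
    exact (PySem.Set.mem_ofList _ _).mpr (List.getElem_mem _)
  have hHnodup : (order.foldl
      (fun d i => d.modify (PySem.List.pyGetD tids i "") [] (fun l => l ++ [i])) G0).keys.Nodup :=
    PySem.Dict.nodup_keys_foldl_modify_key order (fun i : Int => PySem.List.pyGetD tids i "")
      ([] : List Int) (fun (_ : PySem.Dict String (List Int)) (i : Int) => fun l => l ++ [i])
      G0 hG0nodup
  have hHget : ∀ k : String, (order.foldl
      (fun d i => d.modify (PySem.List.pyGetD tids i "") [] (fun l => l ++ [i])) G0).getD k []
      = order.filter (fun i => PySem.List.pyGetD tids i "" == k) := by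
    intro k
    rw [hHfold, PySem.Dict.getD_foldl_modify_append, hG0get, List.nil_append,
      List.filter_map, List.map_map]
    have hcomp : ((fun p : String × Int => p.2) ∘ (fun i : Int => (PySem.List.pyGetD tids i "", i)))
        = id := rfl
    rw [hcomp, List.map_id]
    rfl
  have hBitems : (order.foldl
      (fun d i => d.modify (PySem.List.pyGetD tids i "") [] (fun l => l ++ [i])) G0).items
      = (PySem.Set.ofList tids).map
        (fun k => (k, order.filter (fun i => PySem.List.pyGetD tids i "" == k))) := by
    rw [PySem.Dict.items_eq_map_keys _ hHnodup ([] : List Int), hHkeys]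
    apply List.map_congr_left
    intro k _
    rw [hHget]
  -- put the pieces together
  rw [hAitems, hBitems, hGkeys]
  apply List.map_congr_left
  intro k _
  rw [hGget k, horder, hkey]
  exact congrArg (fun v => (k, v)) (key_value_eq tids dep k)

lemma ports_eq (data : List (String × List Int)) :
    group_by_train data = group_by_train_alt data := by
  unfold group_by_train group_by_train_alt
  cases h1 : (PySem.Dict.ofList data).get? "train_id" with
  | none => cases h2 : (PySem.Dict.ofList data).get? "depart_time" <;> rfl
  | some tlist =>
    cases h2 : (PySem.Dict.ofList data).get? "depart_time" with
    | none => rfl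
    | some dep =>
      simpa using core_eq (tlist.map PySem.Int.toStr) dep

-- ===== VERDICT (by name: the statement is the Claim_ definition above) =====
theorem group_by_train_spec : Claim_equal_group_by_train := by
  intro data _ _
  exact ports_eq data
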